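-- pv_equiv track=rewrite | github.com/claysean/Personal-Projects | TTRPG_Code/DiceDist.py | diceIt
-- ===== SOURCE A (Python) =====
-- def diceIt(dR, dS, n):
--     if dR[n] == dS:
--         dR[n] = 1
--         dR = diceIt(dR, dS, n+1)
--         n -= 1
--     else:
--         dR[n] += 1
--     return(dR)
-- ===== SOURCE B (Python) =====
-- def diceIt(dR, dS, n):
--     # normalize the start index once, scan to the first non-saturated slot,
--     # rewrite the saturated run with one slice assignment, then bump the stop slot
--     if n < 0:
--         n += len(dR)
--     k = n
--     while k < len(dR) and dR[k] == dS:
--         k += 1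
--     dR[n:k] = [1] * (k - n)
--     dR[k] += 1
--     return dR
-- ===== Notes on version B (the rewrite author's own statement) =====
-- stated objective: alternative
-- what changed: Replaces A's recursive per-digit carry (one self-call and one element write per saturated digit) with a normalize-index + scan-for-stop-index + single slice assignment rewriting the whole saturated run at once, then one increment.
-- outside the precondition, e.g. on diceIt([2, 6], 6, -1): A returns [3, 1], B raises IndexError; on diceIt([6, 6], 6, 0): A raises IndexError, B raises IndexError
import Mathlib
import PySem

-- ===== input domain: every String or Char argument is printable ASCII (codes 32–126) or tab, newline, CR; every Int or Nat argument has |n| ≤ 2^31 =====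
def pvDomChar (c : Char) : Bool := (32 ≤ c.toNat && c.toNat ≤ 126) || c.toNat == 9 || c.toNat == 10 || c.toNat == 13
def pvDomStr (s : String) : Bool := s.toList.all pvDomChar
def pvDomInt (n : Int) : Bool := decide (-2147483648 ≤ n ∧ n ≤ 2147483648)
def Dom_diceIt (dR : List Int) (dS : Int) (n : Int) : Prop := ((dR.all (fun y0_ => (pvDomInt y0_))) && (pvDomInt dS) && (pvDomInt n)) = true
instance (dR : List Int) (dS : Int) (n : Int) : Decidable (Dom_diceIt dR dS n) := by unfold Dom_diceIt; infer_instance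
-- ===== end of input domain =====

-- B replaces A's recursive per-digit carry with: normalize the index, scan for the stop index,
-- rewrite the saturated run with one slice assignment, then one increment (alternative decomposition, same cost).
-- Both Pythons mutate dR in place and return it; the equivalence proved here is about the returned value.


-- ===== PORT A =====
-- A: `if dR[n] == dS: dR[n] = 1; dR = diceIt(dR, dS, n+1); n -= 1 else: dR[n] += 1; return dR`.
-- The InRange guard only makes the indexing total: `none` (IndexError) is excluded by Pre_ below,
-- there the port just returns dR.  (A's `n -= 1` is dead: n is not used again.)
def diceIt (dR : List Int) (dS : Int) (n : Int) : List Int :=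
  if h : PySem.Raise.InRange dR.length n then
    if PySem.List.pyGetD dR n 0 = dS then
      diceIt (PySem.List.pySetD dR n 1) dS (n + 1)
    else
      PySem.List.pySetD dR n (PySem.List.pyGetD dR n 0 + 1)
  else dR
termination_by ((dR.length : Int) - n).toNat
decreasing_by
  rcases h with ⟨-, h2⟩
  simp only [PySem.List.length_pySetD]
  omega

-- ===== PORT B =====
-- `k = n; while k < len(dR) and dR[k] == dS: k += 1` — returns the stop index.
def diceItScan (dR : List Int) (dS : Int) (k : Int) : Int :=
  if h : k < (dR.length : Int) ∧ PySem.List.pyGetD dR k 0 = dS then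
    diceItScan dR dS (k + 1)
  else k
termination_by ((dR.length : Int) - k).toNat
decreasing_by
  rcases h with ⟨h1, -⟩
  omega

-- B: `if n < 0: n += len(dR)`, scan for the stop index k, then `dR[n:k] = [1]*(k-n); dR[k] += 1`.
-- The slice assignment is ported as take/replicate/drop, exact for 0 ≤ n ≤ k ≤ len(dR),
-- which is the case reached on every input admitted by Pre_ below.
def diceIt_alt (dR : List Int) (dS : Int) (n : Int) : List Int :=
  let n' := if n < 0 then n + dR.length else n
  let k := diceItScan dR dS n'
  let dR2 := dR.take n'.toNat ++ List.replicate (k - n').toNat 1 ++ dR.drop k.toNat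
  PySem.List.pySetD dR2 k (PySem.List.pyGetD dR2 k 0 + 1)

-- ===== PRECONDITION & SPEC =====
-- Pre_: the inputs on which BOTH Pythons return: the start index is a valid Python index of dR and
-- some position at or after the (normalized) start index holds a value ≠ dS, so the carry stops
-- before the end of the list.  Besides the inputs where A itself raises IndexError, this excludes
-- negative start indices whose saturated run reaches the list's end: there A's carry wraps around
-- to the list's FRONT via Python negative indexing (an artefact A's author cannot have intended for
-- a dice counter), while B's natural scan runs off the end and raises IndexError.
def Pre_diceIt (dR : List Int) (dS : Int) (n : Int) : Prop :=
  PySem.Raise.InRange dR.length n ∧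
  ∃ k ∈ PySem.List.pyRange (if n < 0 then n + dR.length else n) (PySem.List.len dR) 1,
      PySem.List.pyGet? dR k ≠ some dS
instance (dR : List Int) (dS : Int) (n : Int) : Decidable (Pre_diceIt dR dS n) := by unfold Pre_diceIt; infer_instance
def pvWitness_diceIt : List Int × Int × Int := ([1, 6, 1], 6, 0)

def Spec_diceIt (dR : List Int) (dS : Int) (n : Int) (out : List Int) : Prop := out = diceIt_alt dR dS n
instance (dR : List Int) (dS : Int) (n : Int) (out : List Int) : Decidable (Spec_diceIt dR dS n out) := by unfold Spec_diceIt; infer_instance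

-- ===== CLAIM (what is proved, stated in full; the proofs are below) =====
def Claim_equal_diceIt : Prop := ∀ (dR : List Int) (dS : Int) (n : Int), Dom_diceIt dR dS n → Pre_diceIt dR dS n → Spec_diceIt dR dS n (diceIt dR dS n)

-- ===== LEMMAS AND PROOFS =====

-- Python's negative-index wraparound, made explicit for pyGetD / pySetD.
theorem pyGetD_wrap (xs : List Int) (i d : Int) (h1 : -xs.length ≤ i) (h2 : i < 0) :
    PySem.List.pyGetD xs i d = PySem.List.pyGetD xs (i + xs.length) d := by
  have hx : xs.length - (-i).toNat = (i + (xs.length : Int)).toNat := by omega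
  simp only [PySem.List.pyGetD, PySem.List.pyGet?, PySem.List.pyIdx?]
  rw [if_neg (by omega), if_pos h1, if_pos (by omega),
      if_pos (show i + (xs.length : Int) < xs.length by omega), hx]

theorem pySetD_wrap (xs : List Int) (i v : Int) (h1 : -xs.length ≤ i) (h2 : i < 0) :
    PySem.List.pySetD xs i v = PySem.List.pySetD xs (i + xs.length) v := by
  have hx : xs.length - (-i).toNat = (i + (xs.length : Int)).toNat := by omega
  simp only [PySem.List.pySetD, PySem.List.pySet?, PySem.List.pyIdx?]
  rw [if_neg (by omega), if_pos h1, if_pos (by omega),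
      if_pos (show i + (xs.length : Int) < xs.length by omega), hx]

theorem pyGetD_nonneg_getElem? (xs : List Int) (i d : Int) (h : 0 ≤ i) :
    PySem.List.pyGetD xs i d = (xs[i.toNat]?).getD d := by
  simp only [PySem.List.pyGetD, PySem.List.pyGet?, PySem.List.pyIdx?]
  by_cases hl : i < (xs.length : Int)
  · rw [if_pos h, if_pos hl]; rfl
  · rw [if_pos h, if_neg hl]
    have : xs[i.toNat]? = none := by
      rw [List.getElem?_eq_none_iff]; omega
    rw [this]; rfl

-- one step of the while loop
theorem scan_step (dR : List Int) (dS : Int) (k : Int)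
    (h1 : k < (dR.length : Int)) (h2 : PySem.List.pyGetD dR k 0 = dS) :
    diceItScan dR dS k = diceItScan dR dS (k + 1) := by
  rw [diceItScan, dif_pos ⟨h1, h2⟩]

-- the while loop stops
theorem scan_stop (dR : List Int) (dS : Int) (k : Int)
    (h : ¬ (k < (dR.length : Int) ∧ PySem.List.pyGetD dR k 0 = dS)) :
    diceItScan dR dS k = k := by
  rw [diceItScan, dif_neg h]

theorem scan_ge (dR : List Int) (dS : Int) (k : Int) : k ≤ diceItScan dR dS k := by
  fun_induction diceItScan dR dS k with
  | case1 k h ih => omega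
  | case2 k h => omega

-- the scan only reads positions ≥ its start index
theorem scan_congr (dR1 dR2 : List Int) (dS : Int) (k : Int)
    (hlen : dR1.length = dR2.length)
    (hag : ∀ j : Int, k ≤ j → PySem.List.pyGetD dR1 j 0 = PySem.List.pyGetD dR2 j 0) :
    diceItScan dR1 dS k = diceItScan dR2 dS k := by
  fun_induction diceItScan dR1 dS k with
  | case1 k h ih =>
    rw [scan_step dR2 dS k (by omega) (by rw [← hag k le_rfl]; exact h.2)]
    exact ih (fun j hj => hag j (by omega))
  | case2 k h =>
    rw [scan_stop dR2 dS k]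
    intro hc
    exact h ⟨by omega, by rw [hag k le_rfl]; exact hc.2⟩

-- the crux: one recursive step of A corresponds to extending the scanned run by one
theorem alt_step (dR : List Int) (dS : Int) (n : Int)
    (hIn : PySem.Raise.InRange dR.length n)
    (hv : PySem.List.pyGetD dR n 0 = dS)
    (hnorm : (if n + 1 < 0 then n + 1 + dR.length else n + 1)
           = (if n < 0 then n + dR.length else n) + 1) :
    diceIt_alt (PySem.List.pySetD dR n 1) dS (n + 1) = diceIt_alt dR dS n := by
  rcases hIn with ⟨hlo, hhi⟩
  set n' : Int := if n < 0 then n + dR.length else n with hn'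
  have hn'0 : 0 ≤ n' := by rw [hn']; split <;> omega
  have hn'len : n' < (dR.length : Int) := by rw [hn']; split <;> omega
  have hvn' : PySem.List.pyGetD dR n' 0 = dS := by
    rw [hn']; split
    · rw [← pyGetD_wrap dR n 0 hlo (by omega)]; exact hv
    · exact hv
  -- the mutated list is dR.set n'.toNat 1
  have hset : PySem.List.pySetD dR n 1 = dR.set n'.toNat 1 := by
    rw [hn']; split
    · rw [pySetD_wrap dR n 1 hlo (by omega), PySem.List.pySetD_of_nonneg _ _ (by omega)]
    · exact PySem.List.pySetD_of_nonneg _ _ (by omega)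
  have hlen : (dR.set n'.toNat 1).length = dR.length := by simp
  -- the set list agrees with dR at all positions ≥ n' + 1
  have hag : ∀ j : Int, n' + 1 ≤ j →
      PySem.List.pyGetD (dR.set n'.toNat 1) j 0 = PySem.List.pyGetD dR j 0 := by
    intro j hj
    rw [pyGetD_nonneg_getElem? _ _ _ (by omega), pyGetD_nonneg_getElem? _ _ _ (by omega),
        List.getElem?_set_ne (by omega)]
  -- both sides compute the same stop index
  have hsk : diceItScan (dR.set n'.toNat 1) dS (n' + 1) = diceItScan dR dS n' := by
    rw [scan_congr (dR.set n'.toNat 1) dR dS (n' + 1) hlen hag,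
        ← scan_step dR dS n' hn'len hvn']
  set k : Int := diceItScan dR dS n' with hk
  have hkge : n' + 1 ≤ k := by
    rw [hk, scan_step dR dS n' hn'len hvn']; exact scan_ge dR dS (n' + 1)
  -- assemble
  have hrep : (k - n').toNat = ((k - (n' + 1)).toNat + 1) := by omega
  have htake : (dR.set n'.toNat 1).take (n' + 1).toNat = dR.take n'.toNat ++ [1] := by
    have hlt : (dR.take n'.toNat).length = n'.toNat := by rw [List.length_take]; omega
    rw [List.set_eq_take_append_cons_drop, if_pos (by omega), List.take_append,
        List.take_take, hlt]
    have h1 : min (n' + 1).toNat n'.toNat = n'.toNat := by omega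
    have h2 : (n' + 1).toNat - n'.toNat = 1 := by omega
    rw [h1, h2]
    rfl
  have hdrop : (dR.set n'.toNat 1).drop k.toNat = dR.drop k.toNat := by
    rw [List.drop_set, if_pos (by omega)]
  simp only [diceIt_alt, hset, hlen, hnorm]
  rw [← hn', hsk, ← hk, htake, hdrop, hrep, List.replicate_succ]
  simp [List.append_assoc]

-- the ports agree on every input admitted by Pre_
theorem diceIt_eq_alt (dR : List Int) (dS : Int) (n : Int)
    (hpre : Pre_diceIt dR dS n) : diceIt dR dS n = diceIt_alt dR dS n := by
  fun_induction diceIt dR dS n with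
  | case1 dR n h hv ih =>
    rcases hpre with ⟨hIn, k0, hk0mem, hk0ne⟩
    rcases hIn with ⟨hlo, hhi⟩
    rw [PySem.List.mem_pyRange_one] at hk0mem
    simp only [PySem.List.len_eq] at hk0mem
    set n' : Int := if n < 0 then n + dR.length else n with hn'
    have hn'0 : 0 ≤ n' := by rw [hn']; split <;> omega
    have hn'len : n' < (dR.length : Int) := by rw [hn']; split <;> omega
    have hvn' : PySem.List.pyGetD dR n' 0 = dS := by
      rw [hn']; split
      · rw [← pyGetD_wrap dR n 0 hlo (by omega)]; exact hv
      · exact hv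
    -- the stop position cannot be n' itself, since dR[n'] = dS
    have hsome : PySem.List.pyGet? dR n' = some dS := by
      rw [PySem.List.pyGet?_eq_some_getElem dR hn'0 hn'len,
          ← PySem.List.pyGetD_eq_getElem dR 0 hn'0 hn'len, hvn']
    have hk0ne' : k0 ≠ n' := fun hEq => hk0ne (hEq ▸ hsome)
    have hk0gt : n' + 1 ≤ k0 := by omega
    have hnorm : (if n + 1 < 0 then n + 1 + dR.length else n + 1) = n' + 1 := by
      rw [hn']; by_cases hneg : n < 0
      · rw [if_pos hneg, if_pos (by omega)]; ring
      · rw [if_neg hneg, if_neg (by omega)]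
    -- Pre_ holds for the recursive call
    have hpre' : Pre_diceIt (PySem.List.pySetD dR n 1) dS (n + 1) := by
      have hset : PySem.List.pySetD dR n 1 = dR.set n'.toNat 1 := by
        rw [hn']; split
        · rw [pySetD_wrap dR n 1 hlo (by omega), PySem.List.pySetD_of_nonneg _ _ (by omega)]
        · exact PySem.List.pySetD_of_nonneg _ _ (by omega)
      refine ⟨?_, k0, ?_, ?_⟩
      · rw [hset]; constructor <;> simp <;> omega
      · rw [PySem.List.mem_pyRange_one]
        rw [hset]
        simp only [PySem.List.len_eq, List.length_set]
        rw [hnorm]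
        omega
      · rw [hset, PySem.List.pyGet?_of_nonneg _ (show (0:Int) ≤ k0 by omega),
            List.getElem?_set_ne (by omega),
            ← PySem.List.pyGet?_of_nonneg _ (show (0:Int) ≤ k0 by omega)]
        exact hk0ne
    rw [ih hpre']
    exact alt_step dR dS n ⟨hlo, hhi⟩ hv (by rw [hnorm, hn'])
  | case2 dR n h hv =>
    rcases hpre with ⟨hIn, -⟩
    rcases hIn with ⟨hlo, hhi⟩
    set n' : Int := if n < 0 then n + dR.length else n with hn'
    have hn'0 : 0 ≤ n' := by rw [hn']; split <;> omega
    have hn'len : n' < (dR.length : Int) := by rw [hn']; split <;> omega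
    have hvn' : PySem.List.pyGetD dR n' 0 ≠ dS := by
      rw [hn']; split
      · rw [← pyGetD_wrap dR n 0 hlo (by omega)]; exact hv
      · exact hv
    have hscan : diceItScan dR dS n' = n' := scan_stop dR dS n' (fun hc => hvn' hc.2)
    have hgetn' : PySem.List.pyGetD dR n' 0 = PySem.List.pyGetD dR n 0 := by
      rw [hn']; split
      · exact (pyGetD_wrap dR n 0 hlo (by omega)).symm
      · rfl
    have hsetn' : ∀ v : Int, PySem.List.pySetD dR n' v = PySem.List.pySetD dR n v := by
      intro v
      rw [hn']; split
      · exact (pySetD_wrap dR n v hlo (by omega)).symm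
      · rfl
    simp only [diceIt_alt, ← hn', hscan, sub_self, Int.toNat_zero, List.replicate_zero,
      List.append_nil, List.take_append_drop]
    rw [hgetn', hsetn']
  | case3 dR n h =>
    exact absurd hpre.1 h

-- ===== VERDICT (by name: the statement is the Claim_ definition above) =====
theorem diceIt_spec : Claim_equal_diceIt := by
  intro dR dS n _ hpre
  exact diceIt_eq_alt dR dS n hpre
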